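-- pv_equiv track=rewrite | github.com/goodrain/rainbond-console | console/services/topological_services.py | app_stopping
-- ===== SOURCE A (Python) =====
-- def app_stopping(statuses: list):
--     stopping = False
--     for status in statuses:
--         if status == "stopping":
--             stopping = True
--             continue
--         if status == "closed":
--             continue
--         return False
--     return stopping
-- ===== SOURCE B (Python) =====
-- def app_stopping(statuses: list):
--     s = set(statuses)
--     return s <= {"stopping", "closed"} and "stopping" in s
-- ===== Notes on version B (the rewrite author's own statement) =====
-- stated objective: simpler
-- what changed: Replaces the explicit loop with flag and early returns by building a set once and expressing the result as a subset test plus a membership test.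
import Mathlib
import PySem

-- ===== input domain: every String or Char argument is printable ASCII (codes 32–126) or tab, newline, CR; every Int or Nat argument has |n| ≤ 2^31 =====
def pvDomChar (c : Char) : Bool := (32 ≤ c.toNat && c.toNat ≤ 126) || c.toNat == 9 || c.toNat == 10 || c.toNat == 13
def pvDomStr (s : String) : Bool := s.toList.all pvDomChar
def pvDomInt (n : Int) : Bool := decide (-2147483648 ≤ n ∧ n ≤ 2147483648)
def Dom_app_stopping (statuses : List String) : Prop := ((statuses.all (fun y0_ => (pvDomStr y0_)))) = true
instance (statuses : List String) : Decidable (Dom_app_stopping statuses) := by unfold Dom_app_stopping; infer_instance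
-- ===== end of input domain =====

-- B replaces A's loop/flag/early-return with a set built once plus subset and membership tests (simpler).


-- ===== PORT A =====
-- loop of A: 'stopping' flag, continue on the two allowed statuses, early return False otherwise
def appStoppingLoop : List String → Bool → Bool
  | [], stopping => stopping
  | status :: rest, stopping =>
    if status == "stopping" then appStoppingLoop rest true
    else if status == "closed" then appStoppingLoop rest stopping
    else false

def app_stopping (statuses : List String) : Bool :=
  appStoppingLoop statuses false

-- ===== PORT B =====
def app_stopping_alt (statuses : List String) : Bool :=
  let s := PySem.Set.ofList statuses
  PySem.Set.issubset s (PySem.Set.ofList ["stopping", "closed"]) && PySem.Set.contains s "stopping"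

-- ===== PRECONDITION & SPEC =====
def Spec_app_stopping (statuses : List String) (out : Bool) : Prop := out = app_stopping_alt statuses
instance (statuses : List String) (out : Bool) : Decidable (Spec_app_stopping statuses out) := by unfold Spec_app_stopping; infer_instance

-- ===== CLAIM (what is proved, stated in full; the proofs are below) =====
def Claim_equal_app_stopping : Prop := ∀ (statuses : List String), Dom_app_stopping statuses → Spec_app_stopping statuses (app_stopping statuses)

-- ===== LEMMAS AND PROOFS =====
theorem appStoppingLoop_char (xs : List String) :
    ∀ st : Bool, appStoppingLoop xs st =
      ((xs.all fun x => x == "stopping" || x == "closed") &&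
        (st || xs.any fun x => x == "stopping")) := by
  induction xs with
  | nil => intro st; simp [appStoppingLoop]
  | cons x rest ih =>
    intro st
    by_cases h1 : x = "stopping"
    · simp [appStoppingLoop, h1, ih]
    · by_cases h2 : x = "closed"
      · simp [appStoppingLoop, h2, ih]
      · simp [appStoppingLoop, h1, h2]

theorem alt_char (xs : List String) :
    app_stopping_alt xs =
      ((xs.all fun x => x == "stopping" || x == "closed") &&
        (xs.any fun x => x == "stopping")) := by
  have hsub : PySem.Set.issubset (PySem.Set.ofList xs) (PySem.Set.ofList ["stopping", "closed"])
      = (xs.all fun x => x == "stopping" || x == "closed") := by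
    rw [Bool.eq_iff_iff, PySem.Set.issubset_iff, List.all_eq_true]
    constructor
    · intro h x hx
      have := h x (by simp [PySem.Set.mem_ofList, hx])
      simp [PySem.Set.mem_ofList] at this
      rcases this with h' | h' <;> simp [h']
    · intro h x hx
      simp [PySem.Set.mem_ofList] at hx ⊢
      have := h x hx
      simp at this
      rcases this with h' | h' <;> simp [h']
  have hmem : PySem.Set.contains (PySem.Set.ofList xs) "stopping"
      = (xs.any fun x => x == "stopping") := by
    rw [Bool.eq_iff_iff, List.any_eq_true]
    simp [PySem.Set.contains, PySem.Set.mem_ofList]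
  simp only [app_stopping_alt]
  rw [hsub, hmem]

-- ===== VERDICT (by name: the statement is the Claim_ definition above) =====
theorem app_stopping_spec : Claim_equal_app_stopping := by
  intro statuses _
  unfold Spec_app_stopping
  rw [alt_char, app_stopping, appStoppingLoop_char]
  simp
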